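-- pv_equiv track=rewrite | github.com/sudhanshu112233shukla/roleplay.1 | inference/gguf_multi_turn.py | split_persona_and_remainder
-- ===== SOURCE A (Python) =====
-- from typing import List, Optional, Tuple
--
-- def split_persona_and_remainder(raw: str) -> Tuple[str, str]:
--     cleaned = raw.strip().strip(".")
--     lower = cleaned.lower()
--     separators = [
--         " and ",
--         " then ",
--         " today",
--         " tonight",
--         " for ",
--         " while ",
--         " now ",
--         " this ",
--         " please ",
--         " but ",
--     ]
--     split_at: Optional[int] = None
--     split_len = 0
--     for sep in separators:
--         idx = lower.find(sep)
--         if idx != -1 and (split_at is None or idx < split_at):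
--             split_at = idx
--             split_len = len(sep)
--     if split_at is not None:
--         persona = cleaned[:split_at].strip(" ,.;:-")
--         remainder = cleaned[split_at + split_len :].strip(" ,.;:-")
--     else:
--         persona, remainder = cleaned, ""
--
--     for lead in ("and ", "then ", "please ", "to "):
--         if remainder.lower().startswith(lead):
--             remainder = remainder[len(lead) :].strip()
--     return persona, remainder
-- ===== SOURCE B (Python) =====
-- from typing import Tuple
--
-- def split_persona_and_remainder(raw: str) -> Tuple[str, str]:
--     cleaned = raw.strip().strip(".")
--     lower = cleaned.lower()
--     separators = [
--         " and ",
--         " then ",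
--         " today",
--         " tonight",
--         " for ",
--         " while ",
--         " now ",
--         " this ",
--         " please ",
--         " but ",
--     ]
--     # single left-to-right scan: the first position where any separator
--     # matches is the minimal find-index; checking separators in list order
--     # reproduces A's tie-breaking (first separator on equal indices).
--     persona, remainder = cleaned, ""
--     for i in range(len(lower)):
--         hit = None
--         for sep in separators:
--             if lower.startswith(sep, i):
--                 hit = sep
--                 break
--         if hit is not None:
--             persona = cleaned[:i].strip(" ,.;:-")
--             remainder = cleaned[i + len(hit):].strip(" ,.;:-")
--             break
--
--     for lead in ("and ", "then ", "please ", "to "):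
--         if remainder.lower().startswith(lead):
--             remainder = remainder[len(lead):].strip()
--     return persona, remainder
-- ===== Notes on version B (the rewrite author's own statement) =====
-- stated objective: alternative
-- what changed: A runs ten independent str.find scans and keeps the minimum index with a running best; B makes one left-to-right scan over positions and stops at the first position where any separator (checked in list order) matches, which yields the same index and tie-breaking.
import Mathlib
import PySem

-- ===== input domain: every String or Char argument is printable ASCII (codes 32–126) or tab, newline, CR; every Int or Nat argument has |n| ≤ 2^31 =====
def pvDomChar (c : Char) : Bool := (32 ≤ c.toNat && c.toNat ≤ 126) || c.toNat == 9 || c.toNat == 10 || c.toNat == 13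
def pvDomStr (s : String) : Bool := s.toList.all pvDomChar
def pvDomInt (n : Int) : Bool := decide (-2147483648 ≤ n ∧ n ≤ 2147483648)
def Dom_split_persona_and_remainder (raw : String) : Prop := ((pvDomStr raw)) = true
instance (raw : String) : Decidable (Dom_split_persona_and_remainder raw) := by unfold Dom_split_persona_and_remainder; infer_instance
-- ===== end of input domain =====

-- B replaces A's ten independent find-scans (with running-minimum bookkeeping) by one
-- left-to-right scan that stops at the first position where any separator matches.

-- shared literal data of both Pythons: the separator list, the strip character set, the lead words
def pvSeps : List (List Char) :=
  [" and ".toList, " then ".toList, " today".toList, " tonight".toList, " for ".toList,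
   " while ".toList, " now ".toList, " this ".toList, " please ".toList, " but ".toList]

def pvStrip : List Char := " ,.;:-".toList

def pvLeads : List (List Char) := ["and ".toList, "then ".toList, "please ".toList, "to ".toList]

-- ===== PORT A =====
-- one iteration of A's 'for sep in separators' minimum-tracking loop
def pvStepA (lower : List Char) (st : Option Int × Int) (sep : List Char) : Option Int × Int :=
  if PySem.Chars.find lower sep ≠ -1 ∧ (st.1 = none ∨ PySem.Chars.find lower sep < st.1.getD 0) then
    (some (PySem.Chars.find lower sep), (sep.length : Int))
  else st

def split_persona_and_remainder (raw : String) : String × String :=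
  let cleaned := PySem.Chars.stripChars (PySem.Chars.strip raw.toList) ['.']
  let lower := PySem.Chars.lower cleaned
  let st := pvSeps.foldl (pvStepA lower) (none, 0)
  let pr : List Char × List Char :=
    match st.1 with
    | some splitAt =>
        (PySem.Chars.stripChars (PySem.List.slice cleaned none (some splitAt)) pvStrip,
         PySem.Chars.stripChars (PySem.List.slice cleaned (some (splitAt + st.2)) none) pvStrip)
    | none => (cleaned, [])
  let remainder := pvLeads.foldl (fun rem lead =>
      if PySem.Chars.startswith (PySem.Chars.lower rem) lead then
        PySem.Chars.strip (PySem.List.slice rem (some ((lead.length : Int))) none)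
      else rem) pr.2
  (String.ofList pr.1, String.ofList remainder)

-- ===== PORT B =====
-- B's 'for i in range(len(lower))' scan: at each position try the separators in order; stop at the first hit
def pvScan (seps : List (List Char)) : Nat → List Char → Option (Nat × Nat)
  | _, [] => none
  | i, c :: t =>
    match seps.find? (fun sep => PySem.Chars.startswith (c :: t) sep) with
    | some sep => some (i, sep.length)
    | none => pvScan seps (i + 1) t

def split_persona_and_remainder_alt (raw : String) : String × String :=
  let cleaned := PySem.Chars.stripChars (PySem.Chars.strip raw.toList) ['.']
  let lower := PySem.Chars.lower cleaned
  let pr : List Char × List Char :=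
    match pvScan pvSeps 0 lower with
    | some (i, k) =>
        (PySem.Chars.stripChars (cleaned.take i) pvStrip,
         PySem.Chars.stripChars (cleaned.drop (i + k)) pvStrip)
    | none => (cleaned, [])
  let remainder := pvLeads.foldl (fun rem lead =>
      if PySem.Chars.startswith (PySem.Chars.lower rem) lead then
        PySem.Chars.strip (PySem.List.slice rem (some ((lead.length : Int))) none)
      else rem) pr.2
  (String.ofList pr.1, String.ofList remainder)

-- ===== PRECONDITION & SPEC =====
def Spec_split_persona_and_remainder (raw : String) (out : String × String) : Prop := out = split_persona_and_remainder_alt raw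
instance (raw : String) (out : String × String) : Decidable (Spec_split_persona_and_remainder raw out) := by unfold Spec_split_persona_and_remainder; infer_instance

-- ===== CLAIM (what is proved, stated in full; the proofs are below) =====
def Claim_equal_split_persona_and_remainder : Prop := ∀ (raw : String), Dom_split_persona_and_remainder raw → Spec_split_persona_and_remainder raw (split_persona_and_remainder raw)

-- ===== LEMMAS AND PROOFS =====

-- every separator is nonempty
lemma pvSeps_ne_nil : ∀ sep ∈ pvSeps, sep ≠ [] := by decide

-- if B's scan fails, no separator matches at any position
lemma pvScan_none : ∀ (t : List Char) (i : Nat), pvScan pvSeps i t = none →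
    ∀ (j : Nat), ∀ sep ∈ pvSeps, ¬ sep <+: t.drop j := by
  intro t
  induction t with
  | nil =>
    intro i _ j sep hsep hpre
    simp only [List.drop_nil] at hpre
    exact pvSeps_ne_nil sep hsep (List.prefix_nil.mp hpre)
  | cons c t ih =>
    intro i h j sep hsep hpre
    simp only [pvScan] at h
    cases hfind : pvSeps.find? (fun sep => PySem.Chars.startswith (c :: t) sep) with
    | some s => rw [hfind] at h; exact absurd h (by simp)
    | none =>
      rw [hfind] at h
      cases j with
      | zero =>
        have := List.find?_eq_none.mp hfind sep hsep
        simp only [List.drop_zero] at hpre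
        exact this ((PySem.Chars.startswith_iff _ _).mpr hpre)
      | succ j' => exact ih (i + 1) h j' sep hsep (by simpa using hpre)

-- if B's scan succeeds, it returns the least matching position and the first separator there
lemma pvScan_some : ∀ (t : List Char) (i p k : Nat), pvScan pvSeps i t = some (p, k) →
    i ≤ p ∧ (∀ j < p - i, ∀ sep ∈ pvSeps, ¬ sep <+: t.drop j) ∧
    ∃ pre sep post, pvSeps = pre ++ sep :: post ∧ sep.length = k ∧
      sep <+: t.drop (p - i) ∧ ∀ s ∈ pre, ¬ s <+: t.drop (p - i) := by
  intro t
  induction t with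
  | nil => intro i p k h; simp [pvScan] at h
  | cons c t ih =>
    intro i p k h
    simp only [pvScan] at h
    cases hfind : pvSeps.find? (fun sep => PySem.Chars.startswith (c :: t) sep) with
    | some s =>
      rw [hfind] at h
      obtain ⟨hp, hk⟩ : i = p ∧ s.length = k := by
        simpa using h
      obtain ⟨hs, pre, post, hdecomp, hpre⟩ := List.find?_eq_some_iff_append.mp hfind
      subst hp
      refine ⟨le_refl i, by omega, pre, s, post, hdecomp, hk, ?_, ?_⟩
      · simpa using (PySem.Chars.startswith_iff _ _).mp hs
      · intro x hx hxpre
        have hx' := hpre x hx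
        simp only [Nat.sub_self, List.drop_zero] at hxpre
        simp [(PySem.Chars.startswith_iff _ _).mpr hxpre] at hx'
    | none =>
      rw [hfind] at h
      obtain ⟨hip, hmin, pre, sep, post, hdecomp, hk, hmatch, hfirst⟩ := ih (i + 1) p k h
      have hpi : p - i = (p - (i + 1)) + 1 := by omega
      refine ⟨by omega, ?_, pre, sep, post, hdecomp, hk, by rw [hpi]; simpa using hmatch, ?_⟩
      · intro j hj s hs hpre
        cases j with
        | zero =>
          have := List.find?_eq_none.mp hfind s hs
          simp only [List.drop_zero] at hpre
          exact this ((PySem.Chars.startswith_iff _ _).mpr hpre)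
        | succ j' =>
          exact hmin j' (by omega) s hs (by simpa using hpre)
      · intro s hs hpre
        exact hfirst s hs (by rw [hpi] at hpre; simpa using hpre)

-- find = p when there is a match at p and none earlier
lemma pvFind_eq (l sep : List Char) (p : Nat) (h1 : sep <+: l.drop p)
    (h2 : ∀ j < p, ¬ sep <+: l.drop j) : PySem.Chars.find l sep = (p : Int) := by
  have hin : PySem.Chars.isIn sep l = true :=
    (PySem.Chars.exists_prefix_drop_iff_isIn _ _).mp ⟨p, h1⟩
  have hne : PySem.Chars.find l sep ≠ -1 :=
    (PySem.Chars.find_ne_neg_one_iff _ _).mpr ((PySem.Chars.isIn_iff_infix _ _).mp hin)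
  have hspec := PySem.Chars.findFrom_natCast_spec l sep 0 (Nat.zero_le _)
    (by simpa [Nat.cast_zero, PySem.Chars.findFrom_zero] using hne)
  simp only [Nat.cast_zero, PySem.Chars.findFrom_zero] at hspec
  obtain ⟨-, hpre, hmin⟩ := hspec
  have hnn : 0 ≤ PySem.Chars.find l sep := (PySem.Chars.find_nonneg_iff _ _).mpr
    ((PySem.Chars.isIn_iff_infix _ _).mp hin)
  have hle : (PySem.Chars.find l sep).toNat ≤ p := by
    by_contra hlt
    exact hmin p (Nat.zero_le _) (by omega) h1
  have hge : p ≤ (PySem.Chars.find l sep).toNat := by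
    by_contra hlt
    exact h2 _ (by omega) hpre
  omega

-- find = -1 when no position matches
lemma pvFind_none (l sep : List Char) (h : ∀ j, ¬ sep <+: l.drop j) :
    PySem.Chars.find l sep = -1 := by
  apply (PySem.Chars.find_eq_neg_one_iff _ _).mpr
  intro hinf
  obtain ⟨j, hj⟩ := (PySem.Chars.exists_prefix_drop_iff_isIn _ _).mpr
    ((PySem.Chars.isIn_iff_infix _ _).mpr hinf)
  exact h j hj

-- find ≥ p when no position before p matches
lemma pvFind_ge (l sep : List Char) (p : Nat) (h2 : ∀ j < p, ¬ sep <+: l.drop j) :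
    PySem.Chars.find l sep = -1 ∨ (p : Int) ≤ PySem.Chars.find l sep := by
  by_cases hne : PySem.Chars.find l sep = -1
  · exact Or.inl hne
  · right
    have hspec := PySem.Chars.findFrom_natCast_spec l sep 0 (Nat.zero_le _)
      (by simpa [Nat.cast_zero, PySem.Chars.findFrom_zero] using hne)
    simp only [Nat.cast_zero, PySem.Chars.findFrom_zero] at hspec
    obtain ⟨-, hpre, -⟩ := hspec
    have hnn : 0 ≤ PySem.Chars.find l sep := by
      have := PySem.Chars.neg_one_le_find (s := l) (sub := sep); omega
    by_contra hlt
    exact h2 (PySem.Chars.find l sep).toNat (by omega) hpre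

-- find > p when additionally there is no match at p itself
lemma pvFind_gt (l sep : List Char) (p : Nat) (h2 : ∀ j < p, ¬ sep <+: l.drop j)
    (h3 : ¬ sep <+: l.drop p) :
    PySem.Chars.find l sep = -1 ∨ (p : Int) < PySem.Chars.find l sep := by
  rcases pvFind_ge l sep p h2 with h | h
  · exact Or.inl h
  · right
    rcases lt_or_eq_of_le h with h' | h'
    · exact h'
    · exfalso
      have hspec := PySem.Chars.findFrom_natCast_spec l sep 0 (Nat.zero_le _)
        (by simp [PySem.Chars.findFrom_zero]; omega)
      simp only [Nat.cast_zero, PySem.Chars.findFrom_zero] at hspec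
      obtain ⟨-, hpre, -⟩ := hspec
      rw [← h'] at hpre
      simpa using h3 hpre

-- invariant for A's loop over the separators before the winning one
def pvInvGt (p : Nat) (st : Option Int × Int) : Prop :=
  st.1 = none ∨ ∃ v, st.1 = some v ∧ (p : Int) < v

lemma pvFold_pre (l : List Char) (p : Nat) :
    ∀ (seps : List (List Char)) (st : Option Int × Int), pvInvGt p st →
    (∀ sep ∈ seps, PySem.Chars.find l sep = -1 ∨ (p : Int) < PySem.Chars.find l sep) →
    pvInvGt p (seps.foldl (pvStepA l) st) := by
  intro seps
  induction seps with
  | nil => intro st h _; simpa using h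
  | cons s seps ih =>
    intro st hst hall
    simp only [List.foldl_cons]
    apply ih
    · unfold pvStepA
      split_ifs with hc
      · right
        refine ⟨PySem.Chars.find l s, rfl, ?_⟩
        rcases hall s (by simp) with h | h
        · exact absurd h hc.1
        · exact h
      · exact hst
    · intro sep hsep; exact hall sep (by simp [hsep])

lemma pvFold_post (l : List Char) (p : Nat) (L : Int) :
    ∀ (seps : List (List Char)),
    (∀ sep ∈ seps, PySem.Chars.find l sep = -1 ∨ (p : Int) ≤ PySem.Chars.find l sep) →
    seps.foldl (pvStepA l) (some (p : Int), L) = (some (p : Int), L) := by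
  intro seps
  induction seps with
  | nil => intro _; rfl
  | cons s seps ih =>
    intro hall
    simp only [List.foldl_cons]
    have hstep : pvStepA l (some (p : Int), L) s = (some (p : Int), L) := by
      unfold pvStepA
      rw [if_neg]
      rintro ⟨hne, hor⟩
      rcases hor with h | h
      · simp at h
      · simp only [Option.getD_some] at h
        rcases hall s (by simp) with h' | h' <;> omega
    rw [hstep]
    exact ih (fun sep hsep => hall sep (by simp [hsep]))

lemma pvFold_nohit (l : List Char) :
    ∀ (seps : List (List Char)),
    (∀ sep ∈ seps, PySem.Chars.find l sep = -1) →
    seps.foldl (pvStepA l) (none, 0) = (none, 0) := by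
  intro seps
  induction seps with
  | nil => intro _; rfl
  | cons s seps ih =>
    intro hall
    simp only [List.foldl_cons]
    have hstep : pvStepA l ((none : Option Int), (0 : Int)) s = (none, 0) := by
      unfold pvStepA
      rw [if_neg]
      rintro ⟨hne, -⟩
      exact hne (hall s (by simp))
    rw [hstep]
    exact ih (fun sep hsep => hall sep (by simp [hsep]))

-- the key correspondence: A's minimum-tracking fold equals B's position scan
lemma pvKey (l : List Char) :
    pvSeps.foldl (pvStepA l) (none, 0) =
      (match pvScan pvSeps 0 l with
       | some (i, k) => (some (i : Int), (k : Int))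
       | none => ((none : Option Int), (0 : Int))) := by
  cases hscan : pvScan pvSeps 0 l with
  | none =>
    have hnone := pvScan_none l 0 hscan
    exact pvFold_nohit l pvSeps (fun sep hsep =>
      pvFind_none l sep (fun j => hnone j sep hsep))
  | some pk =>
    obtain ⟨p, k⟩ := pk
    obtain ⟨-, hmin, pre, sep₀, post, hdecomp, hk, hmatch, hfirst⟩ := pvScan_some l 0 p k hscan
    simp only [Nat.sub_zero] at hmin hmatch hfirst
    have hsub : ∀ s ∈ pvSeps, ∀ j < p, ¬ s <+: l.drop j := fun s hs j hj => hmin j hj s hs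
    rw [hdecomp, List.foldl_append]
    -- fold over pre keeps the invariant "none or strictly greater than p"
    have h1 : pvInvGt p (pre.foldl (pvStepA l) (none, 0)) := by
      apply pvFold_pre l p pre (none, 0) (Or.inl rfl)
      intro s hs
      exact pvFind_gt l s p
        (hsub s (by rw [hdecomp]; simp [hs]) )
        (fun hp => hfirst s hs hp)
    -- the winning separator sets the state to (p, its length)
    have hfind₀ : PySem.Chars.find l sep₀ = (p : Int) :=
      pvFind_eq l sep₀ p hmatch (hsub sep₀ (by rw [hdecomp]; simp))
    have h2 : pvStepA l (pre.foldl (pvStepA l) (none, 0)) sep₀ = (some (p : Int), (sep₀.length : Int)) := by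
      rcases h1 with h | ⟨v, hv, hpv⟩
      · have hcond : PySem.Chars.find l sep₀ ≠ -1 ∧
            ((pre.foldl (pvStepA l) (none, 0)).1 = none ∨
              PySem.Chars.find l sep₀ < (pre.foldl (pvStepA l) (none, 0)).1.getD 0) :=
          ⟨by rw [hfind₀]; omega, Or.inl h⟩
        simp only [pvStepA]
        rw [if_pos hcond, hfind₀]
      · have hcond : PySem.Chars.find l sep₀ ≠ -1 ∧
            ((pre.foldl (pvStepA l) (none, 0)).1 = none ∨
              PySem.Chars.find l sep₀ < (pre.foldl (pvStepA l) (none, 0)).1.getD 0) :=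
          ⟨by rw [hfind₀]; omega, Or.inr (by rw [hv, hfind₀]; simpa using hpv)⟩
        simp only [pvStepA]
        rw [if_pos hcond, hfind₀]
    simp only [List.foldl_cons, h2]
    rw [pvFold_post l p (sep₀.length : Int) post
      (fun s hs => pvFind_ge l s p (hsub s (by rw [hdecomp]; simp [hs])))]
    rw [hk]

-- ===== VERDICT (by name: the statement is the Claim_ definition above) =====
theorem split_persona_and_remainder_spec : Claim_equal_split_persona_and_remainder := by
  intro raw _
  unfold Spec_split_persona_and_remainder split_persona_and_remainder split_persona_and_remainder_alt
  simp only [pvKey]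
  cases hscan : pvScan pvSeps 0
      (PySem.Chars.lower (PySem.Chars.stripChars (PySem.Chars.strip raw.toList) ['.'])) with
  | none => rfl
  | some pk =>
    obtain ⟨i, k⟩ := pk
    have hto : PySem.List.slice (PySem.Chars.stripChars (PySem.Chars.strip raw.toList) ['.'])
        none (some (i : Int)) = (PySem.Chars.stripChars (PySem.Chars.strip raw.toList) ['.']).take i :=
      PySem.List.slice_to_natCast _ _
    have hfrom : PySem.List.slice (PySem.Chars.stripChars (PySem.Chars.strip raw.toList) ['.'])
        (some ((i : Int) + (k : Int))) none
        = (PySem.Chars.stripChars (PySem.Chars.strip raw.toList) ['.']).drop (i + k) := by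
      rw [show ((i : Int) + (k : Int)) = ((i + k : Nat) : Int) by push_cast; ring]
      exact PySem.List.slice_from_natCast _ _
    simp only [hto, hfrom]
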